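-- pv_equiv track=rewrite | github.com/sirishapandav/python | basketball.py | max_subarray_score
-- ===== SOURCE A (Python) =====
-- def max_subarray_score(n,k,a):
--     max_score=0
--     for i in range(n-k+1):
--         score=0
--         for j in range(k):
--             position=i+j+1
--             score+=position*a[i+j]
--         max_score=max(max_score, score)
--     return max_score
-- ===== SOURCE B (Python) =====
-- def max_subarray_score(n, k, a):
--     if k <= 0 or n < k:
--         return 0
--     # prefix[i] = sum of (t+1)*a[t] for t < i; the score of the window at i
--     # is the prefix difference prefix[i+k] - prefix[i], so one O(n) pass suffices.
--     prefix = [0]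
--     s = 0
--     for i in range(n):
--         s += (i + 1) * a[i]
--         prefix.append(s)
--     return max(0, max(prefix[i + k] - prefix[i] for i in range(n - k + 1)))
-- ===== Notes on version B (the rewrite author's own statement) =====
-- stated objective: alternative
-- what changed: A rescans every k-element window with a nested loop (O(n*k)); B builds prefix sums of (i+1)*a[i] in one pass and takes each window score as a prefix difference.
import Mathlib
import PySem

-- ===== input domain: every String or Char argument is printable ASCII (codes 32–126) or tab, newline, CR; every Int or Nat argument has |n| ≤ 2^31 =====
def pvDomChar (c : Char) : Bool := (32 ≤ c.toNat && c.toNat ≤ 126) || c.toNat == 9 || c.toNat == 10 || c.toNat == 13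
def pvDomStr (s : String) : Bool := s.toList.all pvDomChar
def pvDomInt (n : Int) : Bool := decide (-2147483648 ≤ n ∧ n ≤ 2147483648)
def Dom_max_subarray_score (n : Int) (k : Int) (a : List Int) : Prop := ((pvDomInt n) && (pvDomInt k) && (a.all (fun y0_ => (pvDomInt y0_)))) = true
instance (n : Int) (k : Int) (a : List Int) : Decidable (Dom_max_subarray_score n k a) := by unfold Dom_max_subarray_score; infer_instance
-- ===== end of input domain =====

-- B replaces A's nested rescan of every window by a single pass of prefix sums of
-- (i+1)*a[i], each window score becoming a prefix difference (alternative algorithm).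

-- ===== PORT A =====
def max_subarray_score (n : Int) (k : Int) (a : List Int) : Int :=
  (PySem.List.pyRange 0 (n - k + 1) 1).foldl
    (fun max_score i =>
      let score := (PySem.List.pyRange 0 k 1).foldl
        (fun score j => score + (i + j + 1) * PySem.List.pyGetD a (i + j) 0) 0
      max max_score score) 0

-- ===== PORT B =====
def max_subarray_score_alt (n : Int) (k : Int) (a : List Int) : Int :=
  if k ≤ 0 ∨ n < k then 0
  else
    -- the loop building 'prefix' carries the pair (prefix, s)
    let ps := (PySem.List.pyRange 0 n 1).foldl
      (fun (ps : List Int × Int) i =>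
        let s := ps.2 + (i + 1) * PySem.List.pyGetD a i 0
        (ps.1 ++ [s], s)) ([0], 0)
    let diffs := (PySem.List.pyRange 0 (n - k + 1) 1).map
      (fun i => PySem.List.pyGetD ps.1 (i + k) 0 - PySem.List.pyGetD ps.1 i 0)
    max 0 ((PySem.List.max? diffs (fun x => x)).getD 0)

-- ===== PRECONDITION & SPEC =====
-- Pre_ excludes exactly the inputs where A raises IndexError (1 ≤ k ≤ n but a is
-- shorter than n, so a[i+j] runs past the end); B raises there too.
def Pre_max_subarray_score (n : Int) (k : Int) (a : List Int) : Prop :=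
  1 ≤ k → k ≤ n → n ≤ (a.length : Int)
instance (n : Int) (k : Int) (a : List Int) : Decidable (Pre_max_subarray_score n k a) := by
  unfold Pre_max_subarray_score; infer_instance
def pvWitness_max_subarray_score : Int × Int × List Int := (3, 2, [1, -2, 3])

def Spec_max_subarray_score (n : Int) (k : Int) (a : List Int) (out : Int) : Prop := out = max_subarray_score_alt n k a
instance (n : Int) (k : Int) (a : List Int) (out : Int) : Decidable (Spec_max_subarray_score n k a out) := by unfold Spec_max_subarray_score; infer_instance

-- ===== CLAIM (what is proved, stated in full; the proofs are below) =====
def Claim_equal_max_subarray_score : Prop := ∀ (n : Int) (k : Int) (a : List Int), Dom_max_subarray_score n k a → Pre_max_subarray_score n k a → Spec_max_subarray_score n k a (max_subarray_score n k a)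

-- ===== LEMMAS AND PROOFS =====

-- prefix sum: pvS a t = Σ_{u<t} (u+1)*a[u]
def pvS (a : List Int) : Nat → Int
  | 0 => 0
  | t + 1 => pvS a t + ((t : Int) + 1) * a.getD t 0

-- A's inner loop equals a prefix difference
theorem pv_inner (a : List Int) (i : Int) (m : Nat) (hi : 0 ≤ i) :
    (PySem.List.pyRange 0 (m : Int) 1).foldl
      (fun score j => score + (i + j + 1) * PySem.List.pyGetD a (i + j) 0) 0
    = pvS a (i.toNat + m) - pvS a i.toNat := by
  induction m with
  | zero => simp [PySem.List.pyRange_one_eq_nil]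
  | succ m ih =>
    rw [show (((m + 1 : Nat)) : Int) = (m : Int) + 1 by push_cast; ring]
    rw [PySem.List.pyRange_one_succ_right (by positivity)]
    rw [List.foldl_append, ih]
    simp only [List.foldl_cons, List.foldl_nil]
    have h1 : i + (m : Int) = ((i.toNat + m : Nat) : Int) := by omega
    rw [h1, PySem.List.pyGetD_natCast]
    have h2 : i.toNat + (m + 1) = (i.toNat + m) + 1 := by omega
    rw [h2]
    simp only [pvS]
    ring

-- B's prefix-building loop
theorem pv_prefix (a : List Int) (m : Nat) :
    (PySem.List.pyRange 0 (m : Int) 1).foldl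
      (fun (ps : List Int × Int) i =>
        let s := ps.2 + (i + 1) * PySem.List.pyGetD a i 0
        (ps.1 ++ [s], s)) ([0], 0)
    = ((List.range (m + 1)).map (pvS a), pvS a m) := by
  induction m with
  | zero => simp [PySem.List.pyRange_one_eq_nil, pvS]
  | succ m ih =>
    rw [show (((m + 1 : Nat)) : Int) = (m : Int) + 1 by push_cast; ring]
    rw [PySem.List.pyRange_one_succ_right (by positivity)]
    rw [List.foldl_append, ih]
    simp only [List.foldl_cons, List.foldl_nil, PySem.List.pyGetD_natCast]
    simp [List.range_succ, pvS]

theorem pv_foldl_max_comm (t : List Int) (c x : Int) :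
    t.foldl max (max c x) = max c (t.foldl max x) := by
  induction t generalizing x with
  | nil => rfl
  | cons y t ih => simp only [List.foldl_cons, max_assoc, ih]

theorem pv_foldl_max_zero (l : List Int) :
    l.foldl (fun (m : Int) (_ : Int) => max m 0) 0 = 0 := by
  induction l with
  | nil => rfl
  | cons y t ih => simpa using ih

-- ===== VERDICT (by name: the statement is the Claim_ definition above) =====
theorem max_subarray_score_spec : Claim_equal_max_subarray_score := by
  intro n k a _ hpre
  unfold Spec_max_subarray_score max_subarray_score max_subarray_score_alt
  simp only []
  by_cases hk : k ≤ 0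
  · -- inner range empty: A is a running max of 0
    rw [if_pos (Or.inl hk)]
    have hin : PySem.List.pyRange 0 k 1 = [] := PySem.List.pyRange_one_eq_nil hk
    rw [hin]
    simp only [List.foldl_nil]
    exact pv_foldl_max_zero _
  · by_cases hnk : n < k
    · -- outer range empty
      have : PySem.List.pyRange 0 (n - k + 1) 1 = [] :=
        PySem.List.pyRange_one_eq_nil (by omega)
      rw [this, if_pos (Or.inr hnk)]
      rfl
    · -- main case: 1 ≤ k ≤ n ≤ len a
      have hk1 : 1 ≤ k := by omega
      have hkn : k ≤ n := by omega
      have hlen : n ≤ (a.length : Int) := hpre hk1 hkn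
      rw [if_neg (by omega : ¬(k ≤ 0 ∨ n < k))]
      -- rewrite B's prefix pair
      have hn0 : (0 : Int) ≤ n := by omega
      have hn : ((n.toNat : Nat) : Int) = n := by omega
      have hpv := pv_prefix a n.toNat
      rw [hn] at hpv
      rw [hpv]
      -- the window-score function
      set W : Int → Int := fun i => pvS a (i + k).toNat - pvS a i.toNat with hW
      -- A's fold computes max over W
      have hA : (PySem.List.pyRange 0 (n - k + 1) 1).foldl
          (fun max_score i =>
            max max_score ((PySem.List.pyRange 0 k 1).foldl
              (fun score j => score + (i + j + 1) * PySem.List.pyGetD a (i + j) 0) 0)) 0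
          = (PySem.List.pyRange 0 (n - k + 1) 1).foldl (fun m i => max m (W i)) 0 := by
        refine PySem.List.foldl_congr_mem _ _ _ _ (fun acc i hi => ?_)
        have hmem := (PySem.List.mem_pyRange_one).1 hi
        have hi0 : 0 ≤ i := hmem.1
        have hkk : k = ((k.toNat : Nat) : Int) := by omega
        rw [hkk, pv_inner a i k.toNat hi0]
        have : i.toNat + k.toNat = (i + k).toNat := by omega
        rw [this, hW]
      rw [hA]
      -- B's diffs list is the map of W
      have hB : (PySem.List.pyRange 0 (n - k + 1) 1).map
          (fun i => PySem.List.pyGetD ((List.range (n.toNat + 1)).map (pvS a)) (i + k) 0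
                  - PySem.List.pyGetD ((List.range (n.toNat + 1)).map (pvS a)) i 0)
          = (PySem.List.pyRange 0 (n - k + 1) 1).map W := by
        refine List.map_congr_left (fun i hi => ?_)
        have hmem := (PySem.List.mem_pyRange_one).1 hi
        rw [PySem.List.pyGetD_eq_getElem _ 0 (by omega)
              (by simp only [List.length_map, List.length_range]; omega),
            PySem.List.pyGetD_eq_getElem _ 0 (by omega)
              (by simp only [List.length_map, List.length_range]; omega)]
        simp only [List.getElem_map, List.getElem_range]
        rw [hW]
      rw [hB]
      -- nonempty outer range: peel the head and compare the two max folds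
      have hcons : PySem.List.pyRange 0 (n - k + 1) 1
          = 0 :: PySem.List.pyRange 1 (n - k + 1) 1 := by
        have := PySem.List.pyRange_one_cons (a := 0) (b := n - k + 1) (by omega)
        simpa using this
      rw [hcons]
      set t := PySem.List.pyRange 1 (n - k + 1) 1 with ht
      rw [List.map_cons, PySem.List.max?_id_cons]
      simp only [List.foldl_cons, Option.getD_some]
      rw [← List.foldl_map (f := W) (g := max)]
      exact pv_foldl_max_comm (t.map W) 0 (W 0)
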